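-- pv_equiv track=rewrite | github.com/chriskim12/hermes-agent | tools/yuuka_voice_tool.py | _recency_adjustment
-- ===== SOURCE A (Python) =====
-- def _recency_adjustment(entry_id: str, recent_clip_ids: list[str]) -> tuple[int, list[str]]:
--     if not recent_clip_ids:
--         return 0, []
--
--     recent_tail = [item for item in recent_clip_ids if item]
--     if not recent_tail:
--         return 0, []
--     if recent_tail[-1] == entry_id:
--         return -10_000, ["recent:immediate_repeat_block"]
--
--     penalties_by_distance = {
--         2: 8,
--         3: 5,
--     }
--     for distance, clip_id in enumerate(reversed(recent_tail), start=1):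
--         if distance == 1 or clip_id != entry_id:
--             continue
--         penalty = penalties_by_distance.get(distance, 3)
--         return -penalty, [f"recent:penalty_{distance}"]
--
--     return 0, []
-- ===== SOURCE B (Python) =====
-- def _recency_adjustment(entry_id: str, recent_clip_ids: list[str]) -> tuple[int, list[str]]:
--     # Single forward pass: count non-empty items and remember the forward position of the
--     # last occurrence of entry_id among them; no filtered list, no reversal.
--     n = 0
--     last_pos = None
--     for item in recent_clip_ids:
--         if item:
--             n += 1
--             if item == entry_id:
--                 last_pos = n
--     if last_pos is None:
--         return 0, []
--     d = n - last_pos + 1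
--     if d == 1:
--         return -10_000, ["recent:immediate_repeat_block"]
--     return -(8 if d == 2 else 5 if d == 3 else 3), [f"recent:penalty_{d}"]
-- ===== Notes on version B (the rewrite author's own statement) =====
-- stated objective: alternative
-- what changed: B replaces A's filter + last-element guard + backward enumerate scan with a single forward pass that counts non-empty items and remembers the forward position of the last matching one, then derives the distance arithmetically (d = n - last_pos + 1) and maps it through one conditional expression; no intermediate filtered/reversed lists are built.
import Mathlib
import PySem

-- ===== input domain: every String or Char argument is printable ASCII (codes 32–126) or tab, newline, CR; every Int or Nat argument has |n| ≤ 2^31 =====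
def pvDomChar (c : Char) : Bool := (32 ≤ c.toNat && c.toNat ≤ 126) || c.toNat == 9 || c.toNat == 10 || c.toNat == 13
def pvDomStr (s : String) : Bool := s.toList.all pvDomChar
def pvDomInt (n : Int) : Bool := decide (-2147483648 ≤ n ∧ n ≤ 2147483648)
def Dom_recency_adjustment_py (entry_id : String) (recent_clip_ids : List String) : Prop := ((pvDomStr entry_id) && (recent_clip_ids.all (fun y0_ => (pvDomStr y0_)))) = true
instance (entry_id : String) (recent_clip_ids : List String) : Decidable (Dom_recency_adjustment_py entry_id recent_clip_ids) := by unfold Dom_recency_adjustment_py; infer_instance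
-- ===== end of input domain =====

-- B replaces A's filter + last-element guard + backward enumerate scan with a single forward
-- fold that counts non-empty items and remembers the forward position of the last match,
-- deriving the distance arithmetically; a different decomposition, same cost.


-- ===== PORT A =====
-- A's `for distance, clip_id in enumerate(reversed(recent_tail), start=1)` loop
def pvALoop (entry_id : String) (penalties : PySem.Dict Int Int) : Int → List String → Int × List String
  | _, [] => (0, [])                                   -- loop falls through: return 0, []
  | distance, clip_id :: rest =>
    if distance = 1 ∨ clip_id ≠ entry_id then
      pvALoop entry_id penalties (distance + 1) rest   -- continue
    else
      (-(penalties.getD distance 3), ["recent:penalty_" ++ PySem.Int.toStr distance])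

def recency_adjustment_py (entry_id : String) (recent_clip_ids : List String) : Int × List String :=
  if recent_clip_ids = [] then (0, [])
  else
    let recent_tail := recent_clip_ids.filter (fun item => item ≠ "")
    if recent_tail = [] then (0, [])
    else if recent_tail.getLast?.getD "" = entry_id then  -- recent_tail[-1]; recent_tail is nonempty here, so exact
      (-10000, ["recent:immediate_repeat_block"])
    else
      pvALoop entry_id (PySem.Dict.ofList [(2, 8), (3, 5)]) 1 recent_tail.reverse

-- ===== PORT B =====
-- one step of B's forward pass: state = (count of non-empty items so far, position of last match)
def pvBStep (entry_id : String) (st : Int × Option Int) (item : String) : Int × Option Int :=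
  if item ≠ "" then
    (st.1 + 1, if item = entry_id then some (st.1 + 1) else st.2)
  else st

def recency_adjustment_py_alt (entry_id : String) (recent_clip_ids : List String) : Int × List String :=
  let st := recent_clip_ids.foldl (pvBStep entry_id) (0, none)
  match st.2 with
  | none => (0, [])
  | some last_pos =>
    let d := st.1 - last_pos + 1
    if d = 1 then (-10000, ["recent:immediate_repeat_block"])
    else (-(if d = 2 then 8 else if d = 3 then 5 else 3), ["recent:penalty_" ++ PySem.Int.toStr d])

-- ===== PRECONDITION & SPEC =====
def Spec_recency_adjustment_py (entry_id : String) (recent_clip_ids : List String) (out : Int × List String) : Prop := out = recency_adjustment_py_alt entry_id recent_clip_ids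
instance (entry_id : String) (recent_clip_ids : List String) (out : Int × List String) : Decidable (Spec_recency_adjustment_py entry_id recent_clip_ids out) := by unfold Spec_recency_adjustment_py; infer_instance

-- ===== CLAIM (what is proved, stated in full; the proofs are below) =====
def Claim_equal_recency_adjustment_py : Prop := ∀ (entry_id : String) (recent_clip_ids : List String), Dom_recency_adjustment_py entry_id recent_clip_ids → Spec_recency_adjustment_py entry_id recent_clip_ids (recency_adjustment_py entry_id recent_clip_ids)

-- ===== LEMMAS AND PROOFS =====

-- A's two-entry penalty table is the conditional expression B uses.
lemma pvDict_getD (d : Int) :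
    (PySem.Dict.ofList [(2, 8), (3, 5)] : PySem.Dict Int Int).getD d 3 =
      if d = 2 then 8 else if d = 3 then 5 else 3 := by
  have h : (PySem.Dict.ofList [(2, 8), (3, 5)] : PySem.Dict Int Int) = PySem.Dict.mk [(2,8),(3,5)] := by decide
  rw [h]
  simp only [PySem.Dict.getD, PySem.Dict.get?_mk_cons]
  by_cases h2 : d = 2
  · simp [h2]
  · have n2 : ((2:Int) == d) = false := by simp; omega
    by_cases h3 : d = 3
    · simp [h3]
    · have n3 : ((3:Int) == d) = false := by simp; omega
      simp [n2, n3, PySem.Dict.get?, h2, h3]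

-- B's fold leaves the state unchanged on empty items, so it equals the fold over the filtered list.
lemma pvFoldl_filter (entry_id : String) :
    ∀ (l : List String) (s : Int × Option Int),
      l.foldl (pvBStep entry_id) s = (l.filter (fun item => item ≠ "")).foldl (pvBStep entry_id) s := by
  intro l
  induction l with
  | nil => intro s; rfl
  | cons a t ih =>
    intro s
    by_cases ha : a = ""
    · subst ha; simp [List.filter, pvBStep, ih]
    · simp [List.filter, ha, List.foldl, ih]

-- Characterization of B's fold over a list of non-empty items, in terms of the
-- reversed-list first-match index that also characterizes A's backward scan.
lemma pvFoldl_char (entry_id : String) :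
    ∀ (t : List String), (∀ x ∈ t, x ≠ "") → ∀ (n : Int) (p : Option Int),
      t.foldl (pvBStep entry_id) (n, p) =
        (n + t.length,
          match PySem.List.index? t.reverse entry_id with
          | some i => some (n + t.length - i)
          | none => p) := by
  intro t
  induction t using List.reverseRecOn with
  | nil => intro _ n p; simp [PySem.List.index?]
  | append_singleton t a ih =>
    intro h n p
    have ha : a ≠ "" := h a (by simp)
    have ht : ∀ x ∈ t, x ≠ "" := fun x hx => h x (by simp [hx])
    rw [List.foldl_append, ih ht n p]
    simp only [List.foldl, List.reverse_append, List.reverse_singleton, List.singleton_append,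
      List.length_append, List.length_singleton]
    by_cases hae : a = entry_id
    · subst hae
      rw [PySem.List.index?_cons_self]
      cases hidx : PySem.List.index? t.reverse a with
      | none => simp [pvBStep, ha, Prod.ext_iff]; omega
      | some i => simp [pvBStep, ha, Prod.ext_iff]; omega
    · rw [PySem.List.index?_cons_of_ne _ hae]
      cases hidx : PySem.List.index? t.reverse entry_id with
      | none => simp [pvBStep, ha, hae, Prod.ext_iff]; omega
      | some i => simp [pvBStep, ha, hae, Prod.ext_iff]; omega

-- A's loop from distance d ≥ 2 is the first-match lookup on the remaining reversed tail.
lemma pvALoop_eq_index? (entry_id : String) (pen : PySem.Dict Int Int) :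
    ∀ (rest : List String) (d : Int), 2 ≤ d →
    pvALoop entry_id pen d rest =
      match PySem.List.index? rest entry_id with
      | none => (0, [])
      | some i => (-(pen.getD (d + i) 3), ["recent:penalty_" ++ PySem.Int.toStr (d + i)]) := by
  intro rest
  induction rest with
  | nil => intro d _; simp [pvALoop, PySem.List.index?]
  | cons c t ih =>
    intro d hd
    by_cases hc : c = entry_id
    · subst hc
      rw [PySem.List.index?_cons_self]
      simp only [pvALoop]
      rw [if_neg (by simp; omega)]
      simp
    · rw [PySem.List.index?_cons_of_ne t hc]
      simp only [pvALoop]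
      rw [if_pos (Or.inr hc), ih (d + 1) (by omega)]
      cases PySem.List.index? t entry_id with
      | none => rfl
      | some i =>
        simp
        exact ⟨by congr 1; omega, by congr 1; omega⟩

-- ===== VERDICT (by name: the statement is the Claim_ definition above) =====
theorem recency_adjustment_py_spec : Claim_equal_recency_adjustment_py := by
  intro entry_id recent_clip_ids _
  unfold Spec_recency_adjustment_py
  have hfilt : ∀ x ∈ recent_clip_ids.filter (fun item => item ≠ ""), x ≠ "" := by
    intro x hx; simpa using (List.of_mem_filter hx)
  simp only [recency_adjustment_py, recency_adjustment_py_alt]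
  rw [pvFoldl_filter, pvFoldl_char entry_id _ hfilt 0 none]
  set t := recent_clip_ids.filter (fun item => item ≠ "") with ht
  by_cases h0 : recent_clip_ids = []
  · subst h0; simp [ht, PySem.List.index?]
  · rw [if_neg h0]
    cases hrev : t.reverse with
    | nil =>
      have h1 : t = [] := by simpa using congrArg List.reverse hrev
      rw [h1]; rw [h1] at hrev
      simp [PySem.List.index?]
    | cons last front =>
      have h1 : ¬ t = [] := by
        intro h; rw [h] at hrev; simp at hrev
      have hlast : t.getLast?.getD "" = last := by
        rw [← List.head?_reverse, hrev]; rfl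
      rw [if_neg h1, hlast]
      by_cases h2 : last = entry_id
      · rw [if_pos h2, h2, PySem.List.index?_cons_self]
        norm_num
      · rw [if_neg h2, PySem.List.index?_cons_of_ne front h2]
        simp only [pvALoop]
        rw [if_pos (Or.inl trivial), pvALoop_eq_index? entry_id _ front (1 + 1) (by omega)]
        cases hidx : PySem.List.index? front entry_id with
        | none => simp
        | some i =>
          simp only [Option.map_some, pvDict_getD]
          have hd1 : ¬ ((0:Int) + ↑t.length - (0 + ↑t.length - ↑(i + 1)) + 1 = 1) := by push_cast; omega
          have hd : (0:Int) + ↑t.length - (0 + ↑t.length - ↑(i + 1)) + 1 = (1:Int) + 1 + ↑i := by push_cast; omega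
          simp only [hd]
          norm_num
          intro hcon
          exact absurd hcon (by omega)
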